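-- pv_equiv track=rewrite | github.com/prabhat27/prac_codes | merge_sorted_list.py | correctify
-- ===== SOURCE A (Python) =====
-- def correctify(B):
--
--     count = 0
--     while(count < len(B) -1):
--         if(B[count] > B[count + 1]):
--             t = B[count+1]
--             B[count+1] = B[count]
--             B[count] = t
--         count += 1
--
--     return B
-- ===== SOURCE B (Python) =====
-- def correctify(B):
--     # Single bubble pass as a carry scan: keep the larger element as the
--     # carry, emit the smaller; write the result back in place and return B.
--     if not B:
--         return B
--     result = []
--     carry = B[0]
--     for x in B[1:]:
--         if carry > x:
--             result.append(x)
--         else: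
--             result.append(carry)
--             carry = x
--     result.append(carry)
--     B[:] = result
--     return B
-- ===== Notes on version B (the rewrite author's own statement) =====
-- stated objective: alternative
-- what changed: Replaces the in-place index loop with adjacent swaps by a carry-accumulator scan that builds the result list in one pass without indexing, then writes it back.
import Mathlib
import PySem

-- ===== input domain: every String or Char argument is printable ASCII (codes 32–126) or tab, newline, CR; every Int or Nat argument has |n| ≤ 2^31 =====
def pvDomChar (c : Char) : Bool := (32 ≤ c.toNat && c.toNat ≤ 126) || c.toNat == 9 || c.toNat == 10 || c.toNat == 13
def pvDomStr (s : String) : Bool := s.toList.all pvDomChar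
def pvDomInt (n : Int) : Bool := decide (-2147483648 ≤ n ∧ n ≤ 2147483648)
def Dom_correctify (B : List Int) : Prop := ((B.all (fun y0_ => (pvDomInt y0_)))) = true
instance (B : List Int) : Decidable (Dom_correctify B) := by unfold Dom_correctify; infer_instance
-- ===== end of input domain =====

-- B performs the same single bubble pass as A via a carry-accumulator scan instead
-- of index swaps (alternative decomposition, same cost). Both Pythons mutate the
-- argument identically and return it; the theorem is about the returned value.

-- ===== PORT A =====
-- A's while loop: count runs while count < len(B)-1; each step compares B[count]
-- and B[count+1] and swaps in place. Fuel = B.length bounds the iterations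
-- (length is preserved by set, so fuel ≥ remaining steps). The Nat condition
-- count + 1 < B.length is exactly Python's count < len(B) - 1 here.
def correctifyGo : Nat → List Int → Nat → List Int
  | 0, B, _ => B
  | fuel + 1, B, count =>
      if count + 1 < B.length then
        let t := B.getD (count + 1) 0        -- t = B[count+1]
        let c := B.getD count 0              -- B[count]
        let B' := if c > t then (B.set count t).set (count + 1) c else B
        correctifyGo fuel B' (count + 1)
      else B

def correctify (B : List Int) : List Int := correctifyGo B.length B 0

-- ===== PORT B =====
-- carry scan over the tail of B
def correctifyScan (carry : Int) : List Int → List Int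
  | [] => [carry]
  | x :: xs => if carry > x then x :: correctifyScan carry xs
               else carry :: correctifyScan x xs

def correctify_alt (B : List Int) : List Int :=
  match B with
  | [] => []
  | h :: t => correctifyScan h t

-- ===== PRECONDITION & SPEC =====
def Spec_correctify (B : List Int) (out : List Int) : Prop := out = correctify_alt B
instance (B : List Int) (out : List Int) : Decidable (Spec_correctify B out) := by unfold Spec_correctify; infer_instance

-- ===== CLAIM (what is proved, stated in full; the proofs are below) =====
def Claim_equal_correctify : Prop := ∀ (B : List Int), Dom_correctify B → Spec_correctify B (correctify B)

-- ===== LEMMAS AND PROOFS =====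

-- Invariant: with the already-passed prefix P in place, the loop at count = P.length
-- on P ++ c :: R computes P ++ (carry scan of c over R).
theorem correctifyGo_spec (R : List Int) : ∀ (c : Int) (P : List Int) (fuel : Nat),
    R.length + 1 ≤ fuel →
    correctifyGo fuel (P ++ c :: R) P.length = P ++ correctifyScan c R := by
  induction R with
  | nil =>
      intro c P fuel hf
      obtain ⟨f, rfl⟩ : ∃ f, fuel = f + 1 := ⟨fuel - 1, by omega⟩
      simp [correctifyGo, correctifyScan]
  | cons x xs ih =>
      intro c P fuel hf
      obtain ⟨f, rfl⟩ : ∃ f, fuel = f + 1 := ⟨fuel - 1, by omega⟩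
      have hf' : xs.length + 1 ≤ f := by simp at hf; omega
      have hcond : P.length + 1 < (P ++ c :: x :: xs).length := by
        simp only [List.length_append, List.length_cons]; omega
      have ht : (P ++ c :: x :: xs).getD (P.length + 1) 0 = x := by
        rw [List.getD_eq_getElem?_getD]
        rw [List.getElem?_append_right (by omega)]
        simp
      have hc : (P ++ c :: x :: xs).getD P.length 0 = c := by
        rw [List.getD_eq_getElem?_getD]
        rw [List.getElem?_append_right (by omega)]
        simp
      have hswap : ((P ++ c :: x :: xs).set P.length x).set (P.length + 1) c
          = (P ++ [x]) ++ c :: xs := by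
        rw [List.set_append_right _ _ (by omega), List.set_append_right _ _ (by omega)]
        simp
      have hkeep : P ++ c :: x :: xs = (P ++ [c]) ++ x :: xs := by simp
      rw [correctifyGo]
      simp only [hcond, if_pos, ht, hc]
      by_cases h : c > x
      · rw [if_pos h, hswap]
        rw [show P.length + 1 = (P ++ [x]).length by simp]
        rw [ih c (P ++ [x]) f hf']
        simp [correctifyScan, h]
      · rw [if_neg h, hkeep]
        rw [show P.length + 1 = (P ++ [c]).length by simp]
        rw [ih x (P ++ [c]) f hf']
        simp [correctifyScan, h]

-- ===== VERDICT (by name: the statement is the Claim_ definition above) =====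
theorem correctify_spec : Claim_equal_correctify := by
  intro B _
  unfold Spec_correctify correctify correctify_alt
  cases B with
  | nil => simp [correctifyGo]
  | cons h t =>
      have := correctifyGo_spec t h [] (h :: t).length (by simp)
      simpa using this
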